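-- pv_equiv track=rewrite | github.com/K227-arch/TRANSLATOR | lunyoro-translator/backend/dictionary_pipeline.py | _rl_rule
-- ===== SOURCE A (Python) =====
-- def _rl_rule(text: str) -> str:
--     chars = list(text)
--     out = []
--     for i, ch in enumerate(chars):
--         if ch not in ('l','L'):
--             out.append(ch); continue
--         prev = chars[i-1].lower() if i > 0 else ''
--         nxt  = chars[i+1].lower() if i < len(chars)-1 else ''
--         if prev in ('e','i') or nxt in ('e','i'):
--             out.append(ch)
--         else:
--             out.append('R' if ch.isupper() else 'r')
--     return ''.join(out)
-- ===== SOURCE B (Python) =====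
-- def _rl_rule(text: str) -> str:
--     # Two stages: the e/i characters broadcast "protection" to the index on each
--     # side; then a substitution pass replaces every unprotected l/L.
--     protected = set()
--     for i, ch in enumerate(text):
--         if ch in ('e', 'i', 'E', 'I'):
--             protected.add(i - 1)
--             protected.add(i + 1)
--     return ''.join(
--         ('R' if ch == 'L' else 'r') if ch in ('l', 'L') and i not in protected else ch
--         for i, ch in enumerate(text))
-- ===== Notes on version B (the rewrite author's own statement) =====
-- stated objective: alternative
-- what changed: Inverts the direction of the neighbor test: instead of examining both lowercased neighbors of each l/L, a first pass lets every e/i/E/I character mark the index on each side as protected in a set, and a second pass replaces exactly the unprotected l/L characters.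
import Mathlib
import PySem

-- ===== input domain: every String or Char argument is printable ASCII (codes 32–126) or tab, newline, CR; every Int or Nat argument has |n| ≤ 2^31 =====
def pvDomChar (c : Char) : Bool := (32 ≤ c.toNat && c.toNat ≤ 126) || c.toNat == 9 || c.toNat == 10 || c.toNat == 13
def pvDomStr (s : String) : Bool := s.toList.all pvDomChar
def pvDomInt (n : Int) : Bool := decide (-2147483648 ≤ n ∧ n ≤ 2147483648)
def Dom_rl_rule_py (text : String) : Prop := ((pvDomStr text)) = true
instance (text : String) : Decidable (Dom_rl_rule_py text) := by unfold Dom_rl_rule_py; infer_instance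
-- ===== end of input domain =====

-- B inverts the neighbor test: a first pass lets each e/i/E/I mark the index on either side
-- as protected (a set), a second pass replaces exactly the unprotected l/L ("alternative", same cost).

-- ===== PORT A =====
def rl_rule_py (text : String) : String :=
  let chars := text.toList
  let out : List Char := (PySem.List.enumerate chars).foldl (fun out ich =>
    let i := ich.1
    let ch := ich.2
    if ¬ (ch = 'l' ∨ ch = 'L') then out ++ [ch]
    else
      -- prev/nxt are the one-char lowered neighbor strings, '' (= none) at the ends
      let prev : Option Char := if i > 0 then (PySem.List.pyGet? chars (i - 1)).map PySem.Chars.lowerChar else none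
      let nxt  : Option Char := if i < PySem.List.len chars - 1 then (PySem.List.pyGet? chars (i + 1)).map PySem.Chars.lowerChar else none
      if prev = some 'e' ∨ prev = some 'i' ∨ nxt = some 'e' ∨ nxt = some 'i' then out ++ [ch]
      else out ++ [if PySem.Chars.isupper ch then 'R' else 'r']) []
  String.mk out

-- ===== PORT B =====
def rl_rule_py_alt (text : String) : String :=
  let cs := text.toList
  -- pass 1: every e/i/E/I protects the index on each side
  let prot : PySem.Set Int := (PySem.List.enumerate cs).foldl (fun s ich =>
    if ich.2 = 'e' ∨ ich.2 = 'i' ∨ ich.2 = 'E' ∨ ich.2 = 'I' then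
      PySem.Set.add (PySem.Set.add s (ich.1 - 1)) (ich.1 + 1)
    else s) PySem.Set.empty
  -- pass 2: replace the unprotected l/L
  String.mk ((PySem.List.enumerate cs).map (fun ich =>
    if (ich.2 = 'l' ∨ ich.2 = 'L') ∧ ¬ (ich.1 ∈ prot) then
      (if ich.2 = 'L' then 'R' else 'r')
    else ich.2))

-- ===== PRECONDITION & SPEC =====
def Spec_rl_rule_py (text : String) (out : String) : Prop := out = rl_rule_py_alt text
instance (text : String) (out : String) : Decidable (Spec_rl_rule_py text out) := by unfold Spec_rl_rule_py; infer_instance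

-- ===== CLAIM (what is proved, stated in full; the proofs are below) =====
def Claim_equal_rl_rule_py : Prop := ∀ (text : String), Dom_rl_rule_py text → Spec_rl_rule_py text (rl_rule_py text)

-- ===== LEMMAS AND PROOFS =====

-- A's per-character result as a function of the index (A's loop body minus the accumulator).
def fA (cs : List Char) (i : Int) (ch : Char) : Char :=
  if ¬ (ch = 'l' ∨ ch = 'L') then ch
  else
    let prev : Option Char := if i > 0 then (PySem.List.pyGet? cs (i - 1)).map PySem.Chars.lowerChar else none
    let nxt  : Option Char := if i < PySem.List.len cs - 1 then (PySem.List.pyGet? cs (i + 1)).map PySem.Chars.lowerChar else none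
    if prev = some 'e' ∨ prev = some 'i' ∨ nxt = some 'e' ∨ nxt = some 'i' then ch
    else if PySem.Chars.isupper ch then 'R' else 'r'

-- B's protection set, as a named function (rl_rule_py_alt's first fold, definitionally).
def protSet (cs : List Char) : PySem.Set Int :=
  (PySem.List.enumerate cs).foldl (fun s ich =>
    if ich.2 = 'e' ∨ ich.2 = 'i' ∨ ich.2 = 'E' ∨ ich.2 = 'I' then
      PySem.Set.add (PySem.Set.add s (ich.1 - 1)) (ich.1 + 1)
    else s) PySem.Set.empty

lemma A_eq_map (text : String) :
    rl_rule_py text =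
      String.mk ((PySem.List.enumerate text.toList).map (fun ich => fA text.toList ich.1 ich.2)) := by
  have hdef : rl_rule_py text =
      String.mk ((PySem.List.enumerate text.toList).foldl (fun out ich =>
        let i := ich.1
        let ch := ich.2
        if ¬ (ch = 'l' ∨ ch = 'L') then out ++ [ch]
        else
          let prev : Option Char := if i > 0 then (PySem.List.pyGet? text.toList (i - 1)).map PySem.Chars.lowerChar else none
          let nxt  : Option Char := if i < PySem.List.len text.toList - 1 then (PySem.List.pyGet? text.toList (i + 1)).map PySem.Chars.lowerChar else none
          if prev = some 'e' ∨ prev = some 'i' ∨ nxt = some 'e' ∨ nxt = some 'i' then out ++ [ch]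
          else out ++ [if PySem.Chars.isupper ch then 'R' else 'r']) []) := rfl
  have hbody :
      (fun (out : List Char) (ich : Int × Char) =>
        let i := ich.1
        let ch := ich.2
        if ¬ (ch = 'l' ∨ ch = 'L') then out ++ [ch]
        else
          let prev : Option Char := if i > 0 then (PySem.List.pyGet? text.toList (i - 1)).map PySem.Chars.lowerChar else none
          let nxt  : Option Char := if i < PySem.List.len text.toList - 1 then (PySem.List.pyGet? text.toList (i + 1)).map PySem.Chars.lowerChar else none
          if prev = some 'e' ∨ prev = some 'i' ∨ nxt = some 'e' ∨ nxt = some 'i' then out ++ [ch]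
          else out ++ [if PySem.Chars.isupper ch then 'R' else 'r'])
      = fun out ich => out ++ [fA text.toList ich.1 ich.2] := by
    funext out ich
    simp only [fA]
    split_ifs <;> rfl
  rw [hdef, hbody, PySem.List.foldl_append_singleton_eq_map]
  simp

lemma B_eq_map (text : String) :
    rl_rule_py_alt text =
      String.mk ((PySem.List.enumerate text.toList).map (fun ich =>
        if (ich.2 = 'l' ∨ ich.2 = 'L') ∧ ¬ (ich.1 ∈ protSet text.toList) then
          (if ich.2 = 'L' then 'R' else 'r')
        else ich.2)) := rfl

-- lowering lands on e/i exactly for e, i, E, I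
lemma lower_ei (c : Char) :
    (PySem.Chars.lowerChar c = 'e' ∨ PySem.Chars.lowerChar c = 'i') ↔
    (c = 'e' ∨ c = 'i' ∨ c = 'E' ∨ c = 'I') := by
  unfold PySem.Chars.lowerChar PySem.Chars.isupper
  constructor
  · intro h
    by_cases hu : ('A' ≤ c ∧ c ≤ 'Z')
    · have hcond : (decide ('A' ≤ c) && decide (c ≤ 'Z')) = true := by
        simp [hu.1, hu.2]
      rw [if_pos hcond] at h
      have h65 : 65 ≤ c.toNat := hu.1
      have h90 : c.toNat ≤ 90 := hu.2
      have hval : c.toNat + 32 = 101 ∨ c.toNat + 32 = 105 := by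
        rcases h with h | h
        · left
          have := congrArg Char.toNat h
          rw [Char.toNat_ofNat, if_pos (Or.inl (by omega))] at this
          exact this
        · right
          have := congrArg Char.toNat h
          rw [Char.toNat_ofNat, if_pos (Or.inl (by omega))] at this
          exact this
      have h' : c.toNat = 69 ∨ c.toNat = 73 := by omega
      rcases h' with h' | h'
      · exact Or.inr (Or.inr (Or.inl (Char.ext (UInt32.toNat_inj.mp h'))))
      · exact Or.inr (Or.inr (Or.inr (Char.ext (UInt32.toNat_inj.mp h'))))
    · have hcond : ¬ ((decide ('A' ≤ c) && decide (c ≤ 'Z')) = true) := by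
        simp only [Bool.and_eq_true, decide_eq_true_eq]; exact hu
      rw [if_neg hcond] at h
      tauto
  · intro h
    rcases h with h | h | h | h <;> subst h <;> decide

-- membership in the fold that builds the protection set
lemma mem_prot_fold (l : List (Int × Char)) (s : PySem.Set Int) (x : Int) :
    x ∈ l.foldl (fun s ich =>
        if ich.2 = 'e' ∨ ich.2 = 'i' ∨ ich.2 = 'E' ∨ ich.2 = 'I' then
          PySem.Set.add (PySem.Set.add s (ich.1 - 1)) (ich.1 + 1)
        else s) s ↔
    x ∈ s ∨ ∃ p ∈ l, (p.2 = 'e' ∨ p.2 = 'i' ∨ p.2 = 'E' ∨ p.2 = 'I') ∧ (x = p.1 - 1 ∨ x = p.1 + 1) := by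
  induction l generalizing s with
  | nil => simp
  | cons hd tl ih =>
    rw [List.foldl_cons]
    by_cases h : hd.2 = 'e' ∨ hd.2 = 'i' ∨ hd.2 = 'E' ∨ hd.2 = 'I'
    · rw [if_pos h, ih]
      simp only [PySem.Set.mem_add, List.mem_cons]
      constructor
      · rintro (((hs | h1) | h2) | ⟨p, hp, hei, hx⟩)
        · exact Or.inl hs
        · exact Or.inr ⟨hd, Or.inl rfl, h, Or.inl h1⟩
        · exact Or.inr ⟨hd, Or.inl rfl, h, Or.inr h2⟩
        · exact Or.inr ⟨p, Or.inr hp, hei, hx⟩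
      · rintro (hs | ⟨p, (rfl | hp), hei, hx⟩)
        · exact Or.inl (Or.inl (Or.inl hs))
        · rcases hx with hx | hx
          · exact Or.inl (Or.inl (Or.inr hx))
          · exact Or.inl (Or.inr hx)
        · exact Or.inr ⟨p, hp, hei, hx⟩
    · rw [if_neg h, ih]
      constructor
      · rintro (hs | ⟨p, hp, hei, hx⟩)
        · exact Or.inl hs
        · exact Or.inr ⟨p, List.mem_cons_of_mem _ hp, hei, hx⟩
      · rintro (hs | ⟨p, hp, hei, hx⟩)
        · exact Or.inl hs
        · rcases List.mem_cons.mp hp with rfl | hp'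
          · exact absurd hei h
          · exact Or.inr ⟨p, hp', hei, hx⟩

lemma mem_protSet (cs : List Char) (k : Nat) :
    ((k : Int) ∈ protSet cs) ↔
      ((0 < k ∧ k - 1 < cs.length ∧ ∃ h : k - 1 < cs.length,
          (cs[k-1]'h = 'e' ∨ cs[k-1]'h = 'i' ∨ cs[k-1]'h = 'E' ∨ cs[k-1]'h = 'I')) ∨
       (∃ h : k + 1 < cs.length,
          (cs[k+1]'h = 'e' ∨ cs[k+1]'h = 'i' ∨ cs[k+1]'h = 'E' ∨ cs[k+1]'h = 'I'))) := by
  unfold protSet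
  rw [mem_prot_fold]
  simp only [PySem.Set.empty, List.not_mem_nil, false_or]
  constructor
  · rintro ⟨p, hp, hei, hx⟩
    rcases (PySem.List.mem_enumerate_iff cs 0 p).mp hp with ⟨j, hj, rfl⟩
    simp only [zero_add] at hei hx ⊢
    rcases hx with hx | hx
    · -- k = j - 1, so j = k + 1
      have hjk : j = k + 1 := by omega
      subst hjk
      exact Or.inr ⟨hj, hei⟩
    · -- k = j + 1, so j = k - 1 and k > 0
      have hk0 : 0 < k := by omega
      have hjk : j = k - 1 := by omega
      subst hjk
      exact Or.inl ⟨hk0, hj, hj, hei⟩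
  · rintro (⟨hk0, hlt, h, hei⟩ | ⟨h, hei⟩)
    · refine ⟨((k - 1 : Nat), cs[k-1]'h), ?_, hei, Or.inr (by omega)⟩
      exact (PySem.List.mem_enumerate_iff cs 0 _).mpr ⟨k - 1, h, by simp⟩
    · refine ⟨((k + 1 : Nat), cs[k+1]'h), ?_, hei, Or.inl (by omega)⟩
      exact (PySem.List.mem_enumerate_iff cs 0 _).mpr ⟨k + 1, h, by simp⟩

lemma main_list (cs : List Char) :
    (PySem.List.enumerate cs).map (fun ich => fA cs ich.1 ich.2) =
      (PySem.List.enumerate cs).map (fun ich =>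
        if (ich.2 = 'l' ∨ ich.2 = 'L') ∧ ¬ (ich.1 ∈ protSet cs) then
          (if ich.2 = 'L' then 'R' else 'r')
        else ich.2) := by
  apply List.ext_getElem
  · simp
  · intro j hj hj'
    have hjn : j < cs.length := by
      simpa [PySem.List.length_enumerate] using hj
    rw [List.getElem_map, List.getElem_map, PySem.List.getElem_enumerate]
    simp only [zero_add]
    by_cases hl : cs[j] = 'l' ∨ cs[j] = 'L'
    case neg =>
      simp [fA, hl]
    case pos =>
      -- A's neighbor conditions, rewritten to concrete getElem form
      have eprev : (if (j : Int) > 0 then (PySem.List.pyGet? cs ((j : Int) - 1)).map PySem.Chars.lowerChar else none)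
          = (if h0 : j = 0 then none else some (PySem.Chars.lowerChar (cs[j-1]'(by omega)))) := by
        rcases j with _ | k
        · simp
        · have hcast : ((k + 1 : Nat) : Int) - 1 = ((k : Nat) : Int) := by push_cast; ring
          rw [if_pos (by exact_mod_cast Nat.succ_pos k), hcast, PySem.List.pyGet?_natCast]
          simp [List.getElem?_eq_getElem (show k < cs.length by omega)]
      have enxt : (if (j : Int) < PySem.List.len cs - 1 then (PySem.List.pyGet? cs ((j : Int) + 1)).map PySem.Chars.lowerChar else none)
          = (if hlt : j + 1 < cs.length then some (PySem.Chars.lowerChar (cs[j+1]'hlt)) else none) := by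
        by_cases hlt : j + 1 < cs.length
        · have hc : ((j : Int)) < PySem.List.len cs - 1 := by
            simp only [PySem.List.len_eq]; omega
          have hcast : ((j : Nat) : Int) + 1 = ((j + 1 : Nat) : Int) := by push_cast; ring
          rw [if_pos hc, hcast, PySem.List.pyGet?_natCast, List.getElem?_eq_getElem hlt,
              dif_pos hlt]
          rfl
        · have hc : ¬ ((j : Int)) < PySem.List.len cs - 1 := by
            simp only [PySem.List.len_eq]; omega
          rw [if_neg hc, dif_neg hlt]
      simp only [fA, eprev, enxt]
      rw [if_neg (not_not_intro hl)]
      -- translate A's Option-valued condition into B's membership condition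
      have hcond :
          ((if h0 : j = 0 then none else some (PySem.Chars.lowerChar (cs[j-1]'(by omega)))) = some 'e' ∨
           (if h0 : j = 0 then none else some (PySem.Chars.lowerChar (cs[j-1]'(by omega)))) = some 'i' ∨
           (if hlt : j + 1 < cs.length then some (PySem.Chars.lowerChar (cs[j+1]'hlt)) else none) = some 'e' ∨
           (if hlt : j + 1 < cs.length then some (PySem.Chars.lowerChar (cs[j+1]'hlt)) else none) = some 'i')
          ↔ ((j : Int) ∈ protSet cs) := by
        rw [mem_protSet]
        split_ifs with h0 hlt hlt
        · -- j = 0, next exists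
          simp only [false_or, Option.some.injEq]
          constructor
          · intro h
            exact Or.inr ⟨hlt, (lower_ei _).mp h⟩
          · rintro (⟨hk, _⟩ | ⟨_, hei⟩)
            · omega
            · exact (lower_ei _).mpr hei
        · -- j = 0, no next
          simp only [or_false]
          constructor
          · intro h
            exact h.elim
          · rintro (⟨hk, _⟩ | ⟨hk, _⟩)
            · omega
            · omega
        · -- j > 0, next exists
          simp only [Option.some.injEq]
          constructor
          · rintro (h | h | h | h)
            · exact Or.inl ⟨by omega, by omega, by omega, (lower_ei _).mp (Or.inl h)⟩
            · exact Or.inl ⟨by omega, by omega, by omega, (lower_ei _).mp (Or.inr h)⟩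
            · exact Or.inr ⟨hlt, (lower_ei _).mp (Or.inl h)⟩
            · exact Or.inr ⟨hlt, (lower_ei _).mp (Or.inr h)⟩
          · rintro (⟨_, _, h, hei⟩ | ⟨h, hei⟩)
            · rcases (lower_ei _).mpr hei with h' | h'
              · exact Or.inl h'
              · exact Or.inr (Or.inl h')
            · rcases (lower_ei _).mpr hei with h' | h'
              · exact Or.inr (Or.inr (Or.inl h'))
              · exact Or.inr (Or.inr (Or.inr h'))
        · -- j > 0, no next
          simp only [or_false, Option.some.injEq]
          constructor
          · intro h
            exact Or.inl ⟨by omega, by omega, by omega, (lower_ei _).mp h⟩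
          · rintro (⟨_, _, h, hei⟩ | ⟨hk, _⟩)
            · exact (lower_ei _).mpr hei
            · omega
      by_cases hmem : (j : Int) ∈ protSet cs
      · rw [if_pos (hcond.mpr hmem),
            if_neg (fun h => h.2 hmem : ¬ ((cs[j] = 'l' ∨ cs[j] = 'L') ∧ ¬ (j : Int) ∈ protSet cs))]
      · rw [if_neg (fun h => hmem (hcond.mp h))]
        rcases hl with hl | hl
        · rw [hl, if_pos (show ('l' = 'l' ∨ 'l' = 'L') ∧ ¬ (j : Int) ∈ protSet cs from ⟨Or.inl rfl, hmem⟩)]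
          rfl
        · rw [hl, if_pos (show ('L' = 'l' ∨ 'L' = 'L') ∧ ¬ (j : Int) ∈ protSet cs from ⟨Or.inr rfl, hmem⟩)]
          rfl

-- ===== VERDICT (by name: the statement is the Claim_ definition above) =====
theorem rl_rule_py_spec : Claim_equal_rl_rule_py := by
  intro text _
  unfold Spec_rl_rule_py
  rw [A_eq_map, B_eq_map, main_list]
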